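-- pv_equiv track=rewrite | github.com/Arsen1302/Code-copy-detector | TestData/solutions/problem_853_3.py | solution_853_3
-- ===== SOURCE A (Python) =====
-- from typing import List
--
-- def solution_853_3(arr: List[int], target: int) -> int:
-- 	arr.sort()
-- 	low, high = 0, arr[-1]
-- 	memo = {}
-- 	while low<=high:
-- 		mid = low + (high-low) // 2
-- 		count=0
--
-- 		for i in range(len(arr)):
-- 			if arr[i]>mid:
-- 				count+= mid * (len(arr)-i)
-- 				break
-- 			else: count+=arr[i]
--
-- 		if count == target:
-- 			return mid
--
-- 		if count < target:
-- 			low = mid + 1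
--
-- 		else:
-- 			high = mid - 1
--
-- 		memo[mid] = abs(count-target)
--
-- 	return min(sorted(zip(memo.values(), memo.keys())))[1]
-- ===== SOURCE B (Python) =====
-- from typing import List
--
-- def solution_853_3(arr: List[int], target: int) -> int:
-- 	# Sort once, precompute prefix sums; each binary-search step computes the
-- 	# capped sum in O(log n) by bisecting for the first element > mid, and a
-- 	# running (diff, value) best replaces the memo dict + final sort/min pass.
-- 	arr.sort()
-- 	n = len(arr)
-- 	prefix = [0]
-- 	run = 0
-- 	for x in arr:
-- 		run += x
-- 		prefix.append(run)
--
-- 	def capped(v):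
-- 		lo, hi = 0, n
-- 		while lo < hi:
-- 			m = (lo + hi) // 2
-- 			if arr[m] <= v:
-- 				lo = m + 1
-- 			else:
-- 				hi = m
-- 		return prefix[lo] + v * (n - lo)
--
-- 	lo, hi = 0, arr[-1]
-- 	best = None
-- 	while lo <= hi:
-- 		mid = (lo + hi) // 2
-- 		c = capped(mid)
-- 		if c == target:
-- 			return mid
-- 		d = abs(c - target)
-- 		if best is None or (d, mid) < best:
-- 			best = (d, mid)
-- 		if c < target:
-- 			lo = mid + 1
-- 		else:
-- 			hi = mid - 1
-- 	return best[1]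
-- ===== Notes on version B (the rewrite author's own statement) =====
-- stated objective: faster
-- what changed: Each binary-search step now computes the capped sum in O(log n) via precomputed prefix sums plus a hand-written bisection for the first element above mid (instead of A's O(n) scan of the array), and a running (diff, value) pair replaces A's memo dict with its final zip/sort/min pass.
-- outside the precondition, e.g. on solution_853_3([], 5): A raises IndexError, B raises IndexError; on solution_853_3([-3, -1], 0): A raises ValueError, B raises TypeError
import Mathlib
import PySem

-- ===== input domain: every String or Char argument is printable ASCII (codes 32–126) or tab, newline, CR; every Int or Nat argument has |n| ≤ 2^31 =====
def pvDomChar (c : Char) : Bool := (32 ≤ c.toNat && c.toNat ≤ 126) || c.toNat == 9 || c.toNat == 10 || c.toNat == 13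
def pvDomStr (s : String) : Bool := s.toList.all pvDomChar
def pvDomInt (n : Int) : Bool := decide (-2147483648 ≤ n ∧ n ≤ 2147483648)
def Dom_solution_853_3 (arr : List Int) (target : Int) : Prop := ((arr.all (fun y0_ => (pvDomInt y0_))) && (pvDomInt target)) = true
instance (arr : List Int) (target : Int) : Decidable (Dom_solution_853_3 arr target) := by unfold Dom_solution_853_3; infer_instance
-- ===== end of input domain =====

-- B replaces A's O(n) capped-sum scan per binary-search step by prefix sums + an O(log n)
-- bisection, and A's memo dict + final zip/sort/min pass by a running (diff, value) best
-- (objective: faster per step). Both A and B sort arr in place (same mutation); the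
-- equivalence proved here is about the return value.

-- ===== PORT A =====
-- 'for i in range(len(arr))' with break at the first arr[i] > mid, ported as the obvious
-- structural recursion over the (sorted) list: len(arr)-i = length of the remaining suffix.
def pvScanA : List Int → Int → Int → Int
  | [], _, count => count
  | x :: xs, mid, count =>
    if x > mid then count + mid * ((x :: xs).length : Int)
    else pvScanA xs mid (count + x)

-- min(sorted(zip(memo.values(), memo.keys())))[1]; Python tuple comparison is
-- lexicographic (min2?/sorted2 model it); memo = {} (ValueError) is excluded by Pre_.
def pvFinalA (memo : PySem.Dict Int Int) : Int :=
  ((PySem.List.min2? (PySem.List.sorted2 (memo.items.map (fun p => (p.2, p.1)))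
      (fun q => q.1) (fun q => q.2)) (fun q => q.1) (fun q => q.2)).map (fun q => q.2)).getD 0

-- The while loop; 'fuel' is only a structural totality guard (the interval [low, high]
-- shrinks every iteration, and the callers pass fuel > its initial size, so the 0 arm —
-- which is the loop-exit value — is never the reason the recursion stops early).
def pvLoopA (s : List Int) (target : Int) : Nat → Int → Int → PySem.Dict Int Int → Int
  | 0, _, _, memo => pvFinalA memo
  | fuel + 1, low, high, memo =>
    if low ≤ high then
      let mid := low + PySem.Int.floordiv (high - low) 2
      let count := pvScanA s mid 0
      if count = target then mid
      else if count < target then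
        pvLoopA s target fuel (mid + 1) high (memo.insert mid |count - target|)
      else
        pvLoopA s target fuel low (mid - 1) (memo.insert mid |count - target|)
    else pvFinalA memo

def solution_853_3 (arr : List Int) (target : Int) : Int :=
  let s := PySem.List.sorted arr (fun x => x) false
  let high := PySem.List.pyGetD s (-1) 0   -- arr[-1]; IndexError on [] is excluded by Pre_
  pvLoopA s target (high + 2).toNat 0 high PySem.Dict.empty

-- ===== PORT B =====
-- the hand-written bisection loop of Source B; fuel is a structural totality guard only
def pvBisect (s : List Int) (v : Int) : Nat → Int → Int → Int
  | 0, lo, _ => lo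
  | fuel + 1, lo, hi =>
    if lo < hi then
      let m := PySem.Int.floordiv (lo + hi) 2
      if PySem.List.pyGetD s m 0 ≤ v then pvBisect s v fuel (m + 1) hi
      else pvBisect s v fuel lo m
    else lo

-- prefix = [0]; run = 0; for x in arr: run += x; prefix.append(run)
def pvPrefix (s : List Int) : List Int :=
  (s.foldl (fun (st : List Int × Int) x => (st.1 ++ [st.2 + x], st.2 + x)) ([0], 0)).1

def pvCapped (s pre : List Int) (v : Int) : Int :=
  let lo := pvBisect s v (s.length + 1) 0 (s.length : Int)
  PySem.List.pyGetD pre lo 0 + v * ((s.length : Int) - lo)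

-- 'if best is None or (d, mid) < best: best = (d, mid)' (tuple comparison is lexicographic)
def pvBestUpd (best : Option (Int × Int)) (d mid : Int) : Option (Int × Int) :=
  match best with
  | none => some (d, mid)
  | some (bd, bk) => if d < bd ∨ (d = bd ∧ mid < bk) then some (d, mid) else some (bd, bk)

-- best[1]; best = None (TypeError) is excluded by Pre_
def pvFinalB (best : Option (Int × Int)) : Int := (best.map (fun q => q.2)).getD 0

-- the while loop of Source B; fuel is a structural totality guard, as in pvLoopA
def pvLoopB (s pre : List Int) (target : Int) : Nat → Int → Int → Option (Int × Int) → Int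
  | 0, _, _, best => pvFinalB best
  | fuel + 1, lo, hi, best =>
    if lo ≤ hi then
      let mid := PySem.Int.floordiv (lo + hi) 2
      let c := pvCapped s pre mid
      if c = target then mid
      else
        let best' := pvBestUpd best |c - target| mid
        if c < target then pvLoopB s pre target fuel (mid + 1) hi best'
        else pvLoopB s pre target fuel lo (mid - 1) best'
    else pvFinalB best

def solution_853_3_alt (arr : List Int) (target : Int) : Int :=
  let s := PySem.List.sorted arr (fun x => x) false
  let pre := pvPrefix s
  let hi := PySem.List.pyGetD s (-1) 0   -- arr[-1]
  pvLoopB s pre target (hi + 2).toNat 0 hi none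

-- ===== PRECONDITION & SPEC =====
-- Pre_ excludes exactly the inputs on which A raises: arr = [] (IndexError on arr[-1]) and
-- all-negative arr (the while loop never runs, so min() of the empty memo raises ValueError).
def Pre_solution_853_3 (arr : List Int) (target : Int) : Prop :=
  arr ≠ [] ∧ ∃ x ∈ arr, 0 ≤ x
instance (arr : List Int) (target : Int) : Decidable (Pre_solution_853_3 arr target) := by
  unfold Pre_solution_853_3; infer_instance
def pvWitness_solution_853_3 : List Int × Int := ([3, 1, 2], 4)

def Spec_solution_853_3 (arr : List Int) (target : Int) (out : Int) : Prop := out = solution_853_3_alt arr target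
instance (arr : List Int) (target : Int) (out : Int) : Decidable (Spec_solution_853_3 arr target out) := by unfold Spec_solution_853_3; infer_instance

-- ===== CLAIM (what is proved, stated in full; the proofs are below) =====
def Claim_equal_solution_853_3 : Prop := ∀ (arr : List Int) (target : Int), Dom_solution_853_3 arr target → Pre_solution_853_3 arr target → Spec_solution_853_3 arr target (solution_853_3 arr target)

-- ===== LEMMAS AND PROOFS =====

-- abbreviation used only in the proofs: the prefix of s that the count-loop sums
def pvTW (s : List Int) (v : Int) : List Int := s.takeWhile (fun x => decide (x ≤ v))

theorem pvScanA_eq (s : List Int) (v c : Int) :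
    pvScanA s v c = c + (pvTW s v).sum + v * ((s.length : Int) - ((pvTW s v).length : Int)) := by
  induction s generalizing c with
  | nil => simp [pvScanA, pvTW]
  | cons x xs ih =>
    rw [show pvScanA (x :: xs) v c
        = if x > v then c + v * ((x :: xs).length : Int) else pvScanA xs v (c + x) from rfl]
    by_cases h : x ≤ v
    · rw [if_neg (by omega), ih]
      simp only [pvTW, List.takeWhile_cons, h, decide_true, if_true, List.sum_cons,
        List.length_cons]
      push_cast
      ring
    · rw [if_pos (by omega)]
      simp [pvTW, h]

theorem pvTW_char (s : List Int) (v : Int) (hs : s.Pairwise (· ≤ ·)) (j : Nat) (hj : j < s.length) :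
    s[j] ≤ v ↔ j < (pvTW s v).length := by
  induction s generalizing j with
  | nil => simp at hj
  | cons x xs ih =>
    rcases List.pairwise_cons.mp hs with ⟨hx, hxs⟩
    by_cases h : x ≤ v
    · cases j with
      | zero => simp [pvTW, h]
      | succ j =>
        have hj' : j < xs.length := by simpa using hj
        simpa [pvTW, List.takeWhile_cons, h] using ih hxs j hj'
    · have hall : ¬ ((x :: xs)[j] ≤ v) := by
        cases j with
        | zero => simpa using h
        | succ j =>
          have hj' : j < xs.length := by simpa using hj
          have := hx xs[j] (List.getElem_mem hj')
          simp only [List.getElem_cons_succ]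
          omega
      simp [pvTW, h, hall]

theorem pvBisect_eq (s : List Int) (v : Int) (hs : s.Pairwise (· ≤ ·)) :
    ∀ (fuel : Nat) (lo hi : Int), (hi - lo).toNat < fuel → 0 ≤ lo → hi ≤ (s.length : Int) →
      lo ≤ ((pvTW s v).length : Int) → ((pvTW s v).length : Int) ≤ hi →
      pvBisect s v fuel lo hi = ((pvTW s v).length : Int) := by
  intro fuel
  induction fuel with
  | zero => intro lo hi hn; omega
  | succ fuel ih =>
    intro lo hi hn h0 hlen hloT hThi
    rw [pvBisect]
    by_cases h : lo < hi
    · rw [if_pos h]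
      have h2 : (0:Int) < 2 := by norm_num
      have hmlo : lo ≤ PySem.Int.floordiv (lo + hi) 2 := by
        rw [PySem.Int.floordiv_eq_ediv_of_pos h2]; omega
      have hmhi : PySem.Int.floordiv (lo + hi) 2 < hi := by
        rw [PySem.Int.floordiv_eq_ediv_of_pos h2]; omega
      set m := PySem.Int.floordiv (lo + hi) 2 with hm
      have hm0 : 0 ≤ m := le_trans h0 hmlo
      have hmlt : m < (s.length : Int) := lt_of_lt_of_le hmhi hlen
      have hget : PySem.List.pyGetD s m 0 = s[m.toNat] :=
        PySem.List.pyGetD_eq_getElem s 0 hm0 hmlt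
      have hchar := pvTW_char s v hs m.toNat (by omega)
      by_cases hc : PySem.List.pyGetD s m 0 ≤ v
      · rw [if_pos hc]
        have hmT : m < ((pvTW s v).length : Int) := by
          have := hchar.mp (by rw [← hget]; exact hc)
          omega
        exact ih (m+1) hi (by omega) (by omega) hlen (by omega) hThi
      · rw [if_neg hc]
        have hTm : ((pvTW s v).length : Int) ≤ m := by
          by_contra hlt
          exact hc (by rw [hget]; exact hchar.mpr (by omega))
        exact ih lo m (by omega) h0 (le_of_lt hmlt) hloT hTm
    · rw [if_neg h]
      omega

theorem pvPrefix_eq (s : List Int) :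
    pvPrefix s = (List.range (s.length + 1)).map (fun i => (s.take i).sum) := by
  have main : ∀ (s : List Int),
      s.foldl (fun (st : List Int × Int) x => (st.1 ++ [st.2 + x], st.2 + x)) ([0], 0)
        = ((List.range (s.length + 1)).map (fun i => (s.take i).sum), s.sum) := by
    intro s
    induction s using List.reverseRecOn with
    | nil => simp
    | append_singleton xs x ih =>
      rw [List.foldl_append, ih]
      simp only [List.foldl_cons, List.foldl_nil, List.length_append, List.length_cons,
        List.length_nil, Nat.zero_add, Prod.mk.injEq]
      refine ⟨?_, by simp⟩
      conv_rhs => rw [List.range_succ]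
      rw [List.map_append]
      congr 1
      · exact List.map_congr_left (fun i hi => by
          rw [List.take_append_of_le_length (Nat.lt_succ_iff.mp (List.mem_range.mp hi))])
      · simp
  rw [pvPrefix, main]

theorem pvCapped_eq (s : List Int) (v : Int) (hs : s.Pairwise (· ≤ ·)) :
    pvCapped s (pvPrefix s) v = pvScanA s v 0 := by
  have hTle : (pvTW s v).length ≤ s.length :=
    (List.takeWhile_prefix _).length_le
  have hb := pvBisect_eq s v hs (s.length + 1)
    0 (s.length : Int) (by omega) (by omega) le_rfl (by omega) (by exact_mod_cast hTle)
  rw [pvCapped]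
  rw [hb]
  rw [pvPrefix_eq]
  have hlen : ((pvTW s v).length : Int) < ((List.range (s.length + 1)).length : Int) := by
    simp only [List.length_range]; omega
  rw [PySem.List.pyGetD_eq_getElem _ 0 (by omega) (by simpa using hlen)]
  rw [pvScanA_eq]
  have htoNat : ((pvTW s v).length : Int).toNat = (pvTW s v).length := by omega
  rw [List.getElem_map]
  rw [List.getElem_range]
  rw [htoNat]
  have htake : s.take (pvTW s v).length = pvTW s v :=
    (List.prefix_iff_eq_take.mp (List.takeWhile_prefix _)).symm
  rw [htake]
  ring

-- the fold step of PySem.List.min2? over swapped (value, key) pairs is B's best-update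
def pvMinStep (acc : Option (Int × Int)) (x : Int × Int) : Option (Int × Int) :=
  match acc with
  | none => some x
  | some m => if (decide (x.1 < m.1) || !decide (m.1 < x.1) && decide (x.2 < m.2)) = true
              then some x else some m

theorem pvBestUpd_eq_step (best : Option (Int × Int)) (d k : Int) :
    pvBestUpd best d k = pvMinStep best (d, k) := by
  rcases best with _ | ⟨bd, bk⟩
  · rfl
  · simp only [pvBestUpd, pvMinStep]
    by_cases h1 : d < bd
    · rw [if_pos (Or.inl h1), if_pos (by simp [h1])]
    · by_cases h2 : d = bd ∧ k < bk
      · rw [if_pos (Or.inr h2)]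
        rw [if_pos (by simp; omega)]
      · rw [if_neg (by tauto)]
        rw [if_neg (by simp; omega)]

theorem pvMin2?_eq_foldl (xs : List (Int × Int)) :
    PySem.List.min2? xs (fun q => q.1) (fun q => q.2) = xs.foldl pvMinStep none := by
  unfold PySem.List.min2?
  congr 1
  funext acc x
  rcases acc with _ | m <;> rfl

def pvLexLe (a b : Int × Int) : Prop := a.1 < b.1 ∨ (a.1 = b.1 ∧ a.2 ≤ b.2)

theorem pvLexLe_trans {a b c : Int × Int} (h1 : pvLexLe a b) (h2 : pvLexLe b c) : pvLexLe a c := by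
  rcases h1 with h | ⟨h, h'⟩ <;> rcases h2 with g | ⟨g, g'⟩ <;>
    [exact Or.inl (by omega); exact Or.inl (by omega); exact Or.inl (by omega);
     exact Or.inr ⟨by omega, by omega⟩]

theorem pvLexLe_antisymm {a b : Int × Int} (h1 : pvLexLe a b) (h2 : pvLexLe b a) : a = b := by
  rcases a with ⟨a1, a2⟩; rcases b with ⟨b1, b2⟩
  rcases h1 with h | ⟨h, h'⟩ <;> rcases h2 with g | ⟨g, g'⟩ <;>
    simp_all <;> omega

theorem pvFoldMin_spec (xs : List (Int × Int)) :
    ∀ (acc : Option (Int × Int)),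
      (xs.foldl pvMinStep acc = none ↔ (acc = none ∧ xs = [])) ∧
      (∀ m, xs.foldl pvMinStep acc = some m →
        (m ∈ xs ∨ acc = some m) ∧ (∀ y ∈ xs, pvLexLe m y) ∧ (∀ a, acc = some a → pvLexLe m a)) := by
  induction xs with
  | nil =>
    intro acc
    refine ⟨by simp, ?_⟩
    intro m hm
    simp only [List.foldl_nil] at hm
    refine ⟨Or.inr hm, by simp, ?_⟩
    intro a ha
    rw [hm] at ha; injection ha with ha; subst ha
    exact Or.inr ⟨rfl, le_refl _⟩
  | cons x xs ih =>
    intro acc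
    rcases ih (pvMinStep acc x) with ⟨ihn, ihs⟩
    have hstep : ∀ a, pvMinStep acc x = some a →
        pvLexLe a x ∧ (∀ b, acc = some b → pvLexLe a b) ∧ (a = x ∨ acc = some a) := by
      intro a ha
      rcases acc with _ | b
      · simp only [pvMinStep] at ha
        injection ha with ha; subst ha
        exact ⟨Or.inr ⟨rfl, le_refl _⟩, by simp, Or.inl rfl⟩
      · simp only [pvMinStep] at ha
        have hbool : ((decide (x.1 < b.1) || !decide (b.1 < x.1) && decide (x.2 < b.2)) = true)
            ↔ (x.1 < b.1 ∨ (x.1 = b.1 ∧ x.2 < b.2)) := by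
          simp only [Bool.or_eq_true, Bool.and_eq_true, Bool.not_eq_true',
            decide_eq_true_eq, decide_eq_false_iff_not]
          omega
        by_cases hc : x.1 < b.1 ∨ (x.1 = b.1 ∧ x.2 < b.2)
        · rw [if_pos (hbool.mpr hc)] at ha
          injection ha with ha; subst ha
          refine ⟨Or.inr ⟨rfl, le_refl _⟩, ?_, Or.inl rfl⟩
          intro c hc'; injection hc' with hc'; subst hc'
          rcases hc with h | ⟨h1, h2⟩
          · exact Or.inl h
          · exact Or.inr ⟨h1, by omega⟩
        · rw [if_neg (fun hb => hc (hbool.mp hb))] at ha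
          injection ha with ha; subst ha
          rcases not_or.mp hc with ⟨h1, h2⟩
          refine ⟨?_, ?_, Or.inr rfl⟩
          · by_cases hb : b.1 < x.1
            · exact Or.inl hb
            · have h3 : x.1 = b.1 := by omega
              have h4 : ¬ x.2 < b.2 := fun hl => h2 ⟨h3, hl⟩
              exact Or.inr ⟨h3.symm, by omega⟩
          · intro c hc'; injection hc' with hc'; subst hc'
            exact Or.inr ⟨rfl, le_refl _⟩
    obtain ⟨a0, ha0⟩ : ∃ a0, pvMinStep acc x = some a0 := by
      rcases acc with _ | b
      · exact ⟨x, rfl⟩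
      · simp only [pvMinStep]
        split
        · exact ⟨x, rfl⟩
        · exact ⟨b, rfl⟩
    constructor
    · rw [List.foldl_cons, ihn]
      constructor
      · rintro ⟨h1, -⟩; rw [ha0] at h1; exact absurd h1 (by simp)
      · rintro ⟨-, h2⟩; exact absurd h2 (by simp)
    · intro m hm
      rw [List.foldl_cons] at hm
      rcases ihs m hm with ⟨hmem, hmin, hacc⟩
      have hma0 : pvLexLe m a0 := hacc a0 ha0
      rcases hstep a0 ha0 with ⟨ha0x, ha0acc, ha0mem⟩
      refine ⟨?_, ?_, ?_⟩
      · rcases hmem with h | h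
        · exact Or.inl (List.mem_cons_of_mem _ h)
        · rw [ha0] at h; injection h with h; subst h
          rcases ha0mem with h' | h'
          · exact Or.inl (h' ▸ List.mem_cons_self)
          · exact Or.inr h'
      · intro y hy
        rcases List.mem_cons.mp hy with rfl | hy'
        · exact pvLexLe_trans hma0 ha0x
        · exact hmin y hy'
      · intro a ha
        exact pvLexLe_trans hma0 (ha0acc a ha)

theorem pvMin2?_sorted2 (xs : List (Int × Int)) :
    PySem.List.min2? (PySem.List.sorted2 xs (fun q => q.1) (fun q => q.2))
        (fun q => q.1) (fun q => q.2)
      = PySem.List.min2? xs (fun q => q.1) (fun q => q.2) := by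
  by_cases hnil : xs = []
  · subst hnil; rfl
  · have hperm := PySem.List.sorted2_perm xs (fun q => q.1) (fun q => q.2) false
    rw [pvMin2?_eq_foldl, pvMin2?_eq_foldl]
    have hS : PySem.List.sorted2 xs (fun q => q.1) (fun q => q.2) ≠ [] := by
      intro h
      exact hnil (List.Perm.eq_nil (by simpa [h] using hperm.symm))
    rcases h1 : (PySem.List.sorted2 xs (fun q => q.1) (fun q => q.2)).foldl pvMinStep none
        with _ | m1
    · exact absurd ((pvFoldMin_spec _ none).1.mp h1).2 hS
    rcases h2 : xs.foldl pvMinStep none with _ | m2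
    · exact absurd ((pvFoldMin_spec _ none).1.mp h2).2 hnil
    obtain ⟨hm1mem, hm1min, -⟩ := (pvFoldMin_spec _ none).2 m1 h1
    obtain ⟨hm2mem, hm2min, -⟩ := (pvFoldMin_spec _ none).2 m2 h2
    have hm1S : m1 ∈ PySem.List.sorted2 xs (fun q => q.1) (fun q => q.2) := by
      rcases hm1mem with h | h
      · exact h
      · exact absurd h (by simp)
    have hm2xs : m2 ∈ xs := by
      rcases hm2mem with h | h
      · exact h
      · exact absurd h (by simp)
    have hle1 : pvLexLe m1 m2 := hm1min m2 (hperm.mem_iff.mpr hm2xs)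
    have hle2 : pvLexLe m2 m1 := hm2min m1 (hperm.subset hm1S)
    rw [pvLexLe_antisymm hle1 hle2]

theorem pvFinal_eq (memo : PySem.Dict Int Int) (best : Option (Int × Int))
    (hrel : best = (memo.items.map (fun p => (p.2, p.1))).foldl pvMinStep none) :
    pvFinalA memo = pvFinalB best := by
  rw [pvFinalA, pvFinalB, hrel, ← pvMin2?_eq_foldl, pvMin2?_sorted2]

theorem pvLoop_eq (s pre : List Int) (hs : s.Pairwise (· ≤ ·)) (hpre : pre = pvPrefix s)
    (target : Int) :
    ∀ (fuel : Nat) (low high : Int),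
      ∀ (memo : PySem.Dict Int Int) (best : Option (Int × Int)),
      (∀ k ∈ memo.keys, k < low ∨ high < k) →
      best = (memo.items.map (fun p => (p.2, p.1))).foldl pvMinStep none →
      pvLoopA s target fuel low high memo = pvLoopB s pre target fuel low high best := by
  intro fuel
  induction fuel with
  | zero =>
    intro low high memo best _hk hrel
    exact pvFinal_eq memo best hrel
  | succ fuel ih =>
    intro low high memo best hk hrel
    rw [pvLoopA, pvLoopB]
    by_cases h : low ≤ high
    · rw [if_pos h, if_pos h]
      dsimp only
      have h2 : (0:Int) < 2 := by norm_num
      have hmid : PySem.Int.floordiv (low + high) 2 = low + PySem.Int.floordiv (high - low) 2 := by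
        rw [PySem.Int.floordiv_eq_ediv_of_pos h2, PySem.Int.floordiv_eq_ediv_of_pos h2]; omega
      rw [hmid]
      set mid := low + PySem.Int.floordiv (high - low) 2 with hmiddef
      have hmlo : low ≤ mid := by
        rw [hmiddef, PySem.Int.floordiv_eq_ediv_of_pos h2]; omega
      have hmhi : mid ≤ high := by
        rw [hmiddef, PySem.Int.floordiv_eq_ediv_of_pos h2]; omega
      have hcount : pvCapped s pre mid = pvScanA s mid 0 := by
        rw [hpre]; exact pvCapped_eq s mid hs
      rw [hcount]
      by_cases hq : pvScanA s mid 0 = target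
      · rw [if_pos hq, if_pos hq]
      · rw [if_neg hq, if_neg hq]
        have hfresh : memo.contains mid = false := by
          by_contra hcc
          have hct : memo.contains mid = true := by
            revert hcc; cases memo.contains mid <;> simp
          have hmem : mid ∈ memo.keys := by rwa [← PySem.Dict.contains_iff_mem_keys]
          rcases hk mid hmem with h' | h' <;> omega
        have hitems := PySem.Dict.items_insert_of_not_contains memo
          |pvScanA s mid 0 - target| hfresh
        have hrel' : pvBestUpd best |pvScanA s mid 0 - target| mid
            = ((memo.insert mid |pvScanA s mid 0 - target|).items.map
                (fun p => (p.2, p.1))).foldl pvMinStep none := by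
          rw [hitems, List.map_append, List.foldl_append]
          simp only [List.map_cons, List.map_nil, List.foldl_cons, List.foldl_nil]
          rw [← hrel, pvBestUpd_eq_step]
        have hk1 : ∀ k ∈ (memo.insert mid |pvScanA s mid 0 - target|).keys,
            k < mid + 1 ∨ high < k := by
          intro k hkm
          simp only [PySem.Dict.mem_keys_insert] at hkm
          rcases hkm with rfl | hkm'
          · left; omega
          · rcases hk k hkm' with h' | h'
            · left; omega
            · right; omega
        have hk2 : ∀ k ∈ (memo.insert mid |pvScanA s mid 0 - target|).keys,
            k < low ∨ mid - 1 < k := by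
          intro k hkm
          simp only [PySem.Dict.mem_keys_insert] at hkm
          rcases hkm with rfl | hkm'
          · right; omega
          · rcases hk k hkm' with h' | h'
            · left; omega
            · right; omega
        by_cases hlt : pvScanA s mid 0 < target
        · rw [if_pos hlt, if_pos hlt]
          exact ih (mid + 1) high _ _ hk1 hrel'
        · rw [if_neg hlt, if_neg hlt]
          exact ih low (mid - 1) _ _ hk2 hrel'
    · rw [if_neg h, if_neg h]
      exact pvFinal_eq memo best hrel

-- ===== VERDICT (by name: the statement is the Claim_ definition above) =====
theorem solution_853_3_spec : Claim_equal_solution_853_3 := by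
  intro arr target _hdom _hpre
  unfold Spec_solution_853_3 solution_853_3 solution_853_3_alt
  exact pvLoop_eq _ _ (PySem.List.sorted_pairwise arr (fun x => x)) rfl target _ 0 _
    PySem.Dict.empty none (by simp [PySem.Dict.keys, PySem.Dict.empty]) rfl
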